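-- pv_equiv track=rewrite | github.com/NORSAB/TCRA-Cadenas-Markov-SSRC-Series-Economicas | utils/generar_apendice_datos_reales.py | find_varied_window
-- ===== SOURCE A (Python) =====
-- def find_varied_window(states, window_size=20):
--     """Encuentra la ventana con mayor variedad de estados y transiciones."""
--     best_start = 0
--     best_score = 0
--     for i in range(len(states) - window_size):
--         window = states[i:i + window_size]
--         unique = len(set(window))
--         transitions = sum(1 for j in range(1, len(window)) if window[j] != window[j-1])
--         score = unique * 10 + transitions
--         if score > best_score:
--             best_score = score
--             best_start = i
--     return best_start
-- ===== SOURCE B (Python) =====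
-- def find_varied_window(states, window_size=20):
--     """Encuentra la ventana con mayor variedad de estados y transiciones."""
--     n = len(states)
--     if window_size <= 0 or n - window_size <= 0:
--         return 0
--     w = window_size
--     # prefix sums of adjacent changes: pref[k] = #{j in [1,k] : states[j] != states[j-1]}
--     pref = [0]
--     t = 0
--     for j in range(1, n):
--         if states[j] != states[j - 1]:
--             t += 1
--         pref.append(t)
--     # occurrence counts of the current window, maintained incrementally
--     counts = {}
--     distinct = 0
--     for x in states[:w]:
--         c = counts.get(x, 0)
--         if c == 0:
--             distinct += 1
--         counts[x] = c + 1
--     best_start = 0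
--     best_score = 0
--     for i in range(n - w):
--         if i > 0:
--             # slide: drop states[i-1], add states[i+w-1]
--             out = states[i - 1]
--             counts[out] -= 1
--             if counts[out] == 0:
--                 distinct -= 1
--             inc = states[i + w - 1]
--             c = counts.get(inc, 0)
--             if c == 0:
--                 distinct += 1
--             counts[inc] = c + 1
--         score = distinct * 10 + (pref[i + w - 1] - pref[i])
--         if score > best_score:
--             best_score = score
--             best_start = i
--     return best_start
-- ===== Notes on version B (the rewrite author's own statement) =====
-- stated objective: faster
-- what changed: Replaces the O(n*w) rescan of every window (slice, set(), inner transition sum) by a single O(n) sliding pass: a prefix-sum list gives each window's transition count and a hash counter maintains the distinct-state count incrementally.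
-- outside the precondition, e.g. on find_varied_window([1, 1, 2, 3], -2): A returns 1, B returns 0
import Mathlib
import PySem

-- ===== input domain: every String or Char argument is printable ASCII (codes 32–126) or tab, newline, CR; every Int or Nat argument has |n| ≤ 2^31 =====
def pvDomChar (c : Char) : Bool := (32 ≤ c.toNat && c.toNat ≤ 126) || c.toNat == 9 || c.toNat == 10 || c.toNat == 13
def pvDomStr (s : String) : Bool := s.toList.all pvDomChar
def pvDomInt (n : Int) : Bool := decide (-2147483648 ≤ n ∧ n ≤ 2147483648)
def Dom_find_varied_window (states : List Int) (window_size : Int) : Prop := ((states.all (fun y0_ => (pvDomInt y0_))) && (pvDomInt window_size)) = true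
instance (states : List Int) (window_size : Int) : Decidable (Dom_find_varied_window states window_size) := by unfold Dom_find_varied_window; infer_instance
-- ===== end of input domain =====

-- B replaces A's per-window rescan (slice + set + inner sum, O(n*w)) by one O(n) sliding pass
-- with a transition prefix-sum list and an incrementally maintained distinct-state counter.


-- ===== PORT A =====
def find_varied_window (states : List Int) (window_size : Int) : Int :=
  let r := (PySem.List.pyRange 0 ((states.length : Int) - window_size) 1).foldl
    (fun (bs : Int × Int) i =>
      let window := PySem.List.slice states (some i) (some (i + window_size))
      let unique : Int := ((PySem.Set.ofList window).length : Int)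
      let transitions : Int := (PySem.List.pyRange 1 ((window.length : Int)) 1).foldl
        (fun acc j => if PySem.List.pyGet? window j ≠ PySem.List.pyGet? window (j - 1) then acc + 1 else acc) 0
      let score := unique * 10 + transitions
      if score > bs.2 then (i, score) else bs)
    (0, 0)
  r.1

-- ===== PORT B =====
-- transliteration of Source B; the counter reads counts[out] via getD 0, exact because the key is
-- always present when the Python reads it
def find_varied_window_alt (states : List Int) (window_size : Int) : Int :=
  let n : Int := states.length
  if window_size ≤ 0 ∨ n - window_size ≤ 0 then 0
  else
    let w := window_size
    let pt := (PySem.List.pyRange 1 n 1).foldl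
      (fun (pt : List Int × Int) j =>
        let t := if PySem.List.pyGetD states j 0 ≠ PySem.List.pyGetD states (j - 1) 0 then pt.2 + 1 else pt.2
        (pt.1 ++ [t], t))
      ([0], 0)
    let pref := pt.1
    let cd := (PySem.List.slice states none (some w)).foldl
      (fun (cd : PySem.Dict Int Int × Int) x =>
        let c := cd.1.getD x 0
        let distinct := if c = 0 then cd.2 + 1 else cd.2
        (cd.1.insert x (c + 1), distinct))
      (PySem.Dict.empty, 0)
    let r := (PySem.List.pyRange 0 (n - w) 1).foldl
      (fun (st : PySem.Dict Int Int × Int × Int × Int) i =>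
        let cd :=
          if i > 0 then
            let out := PySem.List.pyGetD states (i - 1) 0
            let c1 := st.1.getD out 0 - 1
            let counts1 := st.1.insert out c1
            let d1 := if c1 = 0 then st.2.1 - 1 else st.2.1
            let inc := PySem.List.pyGetD states (i + w - 1) 0
            let c := counts1.getD inc 0
            let d2 := if c = 0 then d1 + 1 else d1
            (counts1.insert inc (c + 1), d2)
          else (st.1, st.2.1)
        let score := cd.2 * 10 + (PySem.List.pyGetD pref (i + w - 1) 0 - PySem.List.pyGetD pref i 0)
        if score > st.2.2.2 then (cd.1, cd.2, i, score)
        else (cd.1, cd.2, st.2.2.1, st.2.2.2))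
      (cd.1, cd.2, 0, 0)
    r.2.2.1

-- ===== PRECONDITION & SPEC =====
-- Pre_ excludes negative window_size, outside the task's natural domain: there A's negative slice
-- bound wraps around and accidentally scores windows of length n+window_size; B returns 0.
def Pre_find_varied_window (states : List Int) (window_size : Int) : Prop := 0 ≤ window_size
instance (states : List Int) (window_size : Int) : Decidable (Pre_find_varied_window states window_size) := by unfold Pre_find_varied_window; infer_instance
def pvWitness_find_varied_window : List Int × Int := ([1, 2, 2, 3, 1], 2)
def Spec_find_varied_window (states : List Int) (window_size : Int) (out : Int) : Prop := out = find_varied_window_alt states window_size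
instance (states : List Int) (window_size : Int) (out : Int) : Decidable (Spec_find_varied_window states window_size out) := by unfold Spec_find_varied_window; infer_instance

-- ===== CLAIM (what is proved, stated in full; the proofs are below) =====
def Claim_equal_find_varied_window : Prop := ∀ (states : List Int) (window_size : Int), Dom_find_varied_window states window_size → Pre_find_varied_window states window_size → Spec_find_varied_window states window_size (find_varied_window states window_size)

-- ===== LEMMAS AND PROOFS =====

-- proof-side vocabulary ---------------------------------------------------
-- pvD s j: the states at positions j and j+1 differ
def pvD (s : List Int) (j : Nat) : Bool := decide (s[j+1]? ≠ s[j]?)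
-- pvT s k: number of adjacent changes among positions 1..k
def pvT (s : List Int) (k : Nat) : Int := ((List.range k).countP (pvD s) : Int)
-- the window of length wn starting at i
def pvWin (s : List Int) (wn : Nat) (i : Nat) : List Int := (s.drop i).take wn
-- the score A assigns to the window starting at i
def pvScore (s : List Int) (wn : Nat) (i : Nat) : Int :=
  ((pvWin s wn i).toFinset.card : Int) * 10 + (pvT s (i + wn - 1) - pvT s i)
-- the common best-so-far update both loops perform
def pvStep (s : List Int) (wn : Nat) : Int × Int → Int → Int × Int :=
  fun bs i => if pvScore s wn i.toNat > bs.2 then (i, pvScore s wn i.toNat) else bs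

-- named copies of the fold bodies of the two ports (definitionally equal to the lambdas)
def stepA (states : List Int) (window_size : Int) : Int × Int → Int → Int × Int :=
  fun bs i =>
    let window := PySem.List.slice states (some i) (some (i + window_size))
    let unique : Int := ((PySem.Set.ofList window).length : Int)
    let transitions : Int := (PySem.List.pyRange 1 ((window.length : Int)) 1).foldl
      (fun acc j => if PySem.List.pyGet? window j ≠ PySem.List.pyGet? window (j - 1) then acc + 1 else acc) 0
    let score := unique * 10 + transitions
    if score > bs.2 then (i, score) else bs

def stepP (states : List Int) : List Int × Int → Int → List Int × Int :=
  fun pt j =>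
    let t := if PySem.List.pyGetD states j 0 ≠ PySem.List.pyGetD states (j - 1) 0 then pt.2 + 1 else pt.2
    (pt.1 ++ [t], t)

def stepC : PySem.Dict Int Int × Int → Int → PySem.Dict Int Int × Int :=
  fun cd x =>
    let c := cd.1.getD x 0
    let distinct := if c = 0 then cd.2 + 1 else cd.2
    (cd.1.insert x (c + 1), distinct)

def stepM (states : List Int) (w : Int) (pref : List Int) :
    PySem.Dict Int Int × Int × Int × Int → Int → PySem.Dict Int Int × Int × Int × Int :=
  fun st i =>
    let cd :=
      if i > 0 then
        let out := PySem.List.pyGetD states (i - 1) 0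
        let c1 := st.1.getD out 0 - 1
        let counts1 := st.1.insert out c1
        let d1 := if c1 = 0 then st.2.1 - 1 else st.2.1
        let inc := PySem.List.pyGetD states (i + w - 1) 0
        let c := counts1.getD inc 0
        let d2 := if c = 0 then d1 + 1 else d1
        (counts1.insert inc (c + 1), d2)
      else (st.1, st.2.1)
    let score := cd.2 * 10 + (PySem.List.pyGetD pref (i + w - 1) 0 - PySem.List.pyGetD pref i 0)
    if score > st.2.2.2 then (cd.1, cd.2, i, score)
    else (cd.1, cd.2, st.2.2.1, st.2.2.2)

lemma A_as_fold (states : List Int) (window_size : Int) :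
    find_varied_window states window_size =
      ((PySem.List.pyRange 0 ((states.length : Int) - window_size) 1).foldl
        (stepA states window_size) (0, 0)).1 := rfl

lemma B_as_fold (states : List Int) (window_size : Int) :
    find_varied_window_alt states window_size =
      (if window_size ≤ 0 ∨ (states.length : Int) - window_size ≤ 0 then 0
       else
        ((PySem.List.pyRange 0 ((states.length : Int) - window_size) 1).foldl
          (stepM states window_size
            (((PySem.List.pyRange 1 ((states.length : Int)) 1).foldl (stepP states) ([0], 0)).1))
          ((((PySem.List.slice states none (some window_size)).foldl stepC (PySem.Dict.empty, 0)).1),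
           (((PySem.List.slice states none (some window_size)).foldl stepC (PySem.Dict.empty, 0)).2),
           0, 0)).2.2.1) := rfl

-- distinct count of a list as a Finset card
lemma pv_set_len (l : List Int) : ((PySem.Set.ofList l).length : Int) = (l.toFinset.card : Int) := by
  have h1 : (PySem.Set.ofList l).toFinset = l.toFinset := by
    ext x; simp [PySem.Set.mem_ofList]
  have h2 := List.toFinset_card_of_nodup (PySem.Set.nodup_ofList l)
  rw [← h2, h1]

lemma pvWin_length {s : List Int} {wn i : Nat} (h : i + wn ≤ s.length) :
    (pvWin s wn i).length = wn := by
  simp [pvWin]; omega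

lemma pvWin_getElem? {s : List Int} {wn i m : Nat} (hm : m < wn) :
    (pvWin s wn i)[m]? = s[i + m]? := by
  simp [pvWin, List.getElem?_take, List.getElem?_drop, hm]

-- difference of prefix transition counts = transition count over the middle block
lemma pvT_block (s : List Int) (a b : Nat) (hab : a ≤ b) :
    pvT s b - pvT s a = (((List.range (b - a)).countP (fun k => pvD s (a + k)) : Nat) : Int) := by
  have hsplit : List.range b = List.range a ++ (List.range (b - a)).map (fun x => a + x) := by
    conv_lhs => rw [show b = a + (b - a) by omega]
    exact List.range_add
  rw [pvT, pvT, hsplit, List.countP_append, List.countP_map]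
  have hco : List.countP (pvD s ∘ fun x => a + x) (List.range (b - a))
       = List.countP (fun k => pvD s (a + k)) (List.range (b - a)) := rfl
  rw [hco]
  push_cast
  ring

-- counting over pyRange 1 b = counting a shifted predicate over List.range
lemma countP_pyRange_one (a b : Int) (p : Int → Bool) :
    List.countP p (PySem.List.pyRange a b 1) = List.countP (fun (k : Nat) => p (a + (k : Int))) (List.range (b - a).toNat) := by
  rw [PySem.List.pyRange_one]
  exact List.countP_map

-- A's inner transition loop computes pvT s (i+wn-1) - pvT s i
lemma pvTrans_A (s : List Int) (wn i : Nat) (hw : 1 ≤ wn) (h : i + wn ≤ s.length) :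
    ((PySem.List.pyRange 1 (((pvWin s wn i).length : Int)) 1).foldl
      (fun acc j => if PySem.List.pyGet? (pvWin s wn i) j ≠ PySem.List.pyGet? (pvWin s wn i) (j - 1)
        then acc + 1 else acc) 0)
    = pvT s (i + wn - 1) - pvT s i := by
  rw [PySem.List.foldl_ite_add_one
    (fun j => PySem.List.pyGet? (pvWin s wn i) j ≠ PySem.List.pyGet? (pvWin s wn i) (j - 1))]
  rw [pvWin_length h, zero_add, countP_pyRange_one]
  rw [pvT_block s i (i + wn - 1) (by omega)]
  have hlen : ((wn : Int) - 1).toNat = wn - 1 := by omega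
  have hsub : i + wn - 1 - i = wn - 1 := by omega
  rw [hlen, hsub]
  have hpt : ∀ k ∈ List.range (wn - 1),
      (decide (PySem.List.pyGet? (pvWin s wn i) (1 + (k : Int)) ≠ PySem.List.pyGet? (pvWin s wn i) (1 + (k : Int) - 1)) = true)
      ↔ (pvD s (i + k) = true) := by
    intro k hk
    have hk' : k < wn - 1 := by simpa using hk
    have h1 : (1 : Int) + (k : Int) = ((k + 1 : Nat) : Int) := by push_cast; ring
    have h2 : (1 : Int) + (k : Int) - 1 = ((k : Nat) : Int) := by push_cast; ring
    rw [h2, h1]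
    simp only [PySem.List.pyGet?_natCast]
    rw [pvWin_getElem? (by omega : k + 1 < wn), pvWin_getElem? (by omega : k < wn)]
    have h3 : i + (k + 1) = i + k + 1 := by omega
    rw [h3]
    simp [pvD]
  exact_mod_cast List.countP_congr hpt

-- A's fold is the reference fold (main case)
lemma A_fold_eq (s : List Int) (w : Int) (hw0 : 0 < w) :
    (PySem.List.pyRange 0 ((s.length : Int) - w) 1).foldl (stepA s w) (0, 0)
    = (PySem.List.pyRange 0 ((s.length : Int) - w) 1).foldl (pvStep s w.toNat) (0, 0) := by
  apply PySem.List.foldl_congr_mem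
  intro bs i hi
  rw [PySem.List.mem_pyRange_one] at hi
  obtain ⟨hi0, hilt⟩ := hi
  have hwin : PySem.List.slice s (some i) (some (i + w)) = pvWin s w.toNat i.toNat := by
    rw [PySem.List.slice_toNat s hi0 (by omega)]
    have : (i + w).toNat - i.toNat = w.toNat := by omega
    rw [this, pvWin]
  have hle : i.toNat + w.toNat ≤ s.length := by omega
  simp only [stepA, hwin]
  rw [pvTrans_A s w.toNat i.toNat (by omega) hle, pv_set_len]
  rfl

-- zero window size: every slice is empty and A's best stays (0,0)
lemma slice_self_eq_nil (s : List Int) (i : Int) :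
    PySem.List.slice s (some i) (some i) = ([] : List Int) := by
  have h := PySem.List.length_slice s i i
  have : (PySem.List.slice s (some i) (some i)).length = 0 := by rw [h]; omega
  exact List.eq_nil_of_length_eq_zero this

lemma A_zero_step (s : List Int) (bs : Int × Int) (i : Int) :
    stepA s 0 bs i = if 0 > bs.2 then (i, 0) else bs := by
  simp only [stepA, add_zero, slice_self_eq_nil]
  norm_num [PySem.List.pyRange_one_eq_nil]

lemma A_zero_fold (s : List Int) (L : List Int) :
    L.foldl (stepA s 0) (0, 0) = ((0 : Int), (0 : Int)) := by
  induction L with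
  | nil => rfl
  | cons a t ih =>
      rw [List.foldl_cons, A_zero_step]
      norm_num
      exact ih

-- the counter-building fold maintains counts and the distinct cardinality
lemma cnt_fold (l : List Int) : ∀ (p : List Int) (c : PySem.Dict Int Int) (d : Int),
    (∀ x, c.getD x 0 = (p.count x : Int)) → d = (p.toFinset.card : Int) →
    (∀ x, (l.foldl stepC (c, d)).1.getD x 0 = ((p ++ l).count x : Int)) ∧
      (l.foldl stepC (c, d)).2 = ((p ++ l).toFinset.card : Int) := by
  induction l with
  | nil => intro p c d hc hd; simpa using ⟨hc, hd⟩
  | cons x t ih =>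
      intro p c d hc hd
      rw [List.foldl_cons]
      have hstep : stepC (c, d) x
          = (c.insert x (c.getD x 0 + 1), if c.getD x 0 = 0 then d + 1 else d) := rfl
      rw [hstep]
      have h1 : ∀ y, (c.insert x (c.getD x 0 + 1)).getD y 0 = ((p ++ [x]).count y : Int) := by
        intro y
        rw [PySem.Dict.getD_insert]
        by_cases hyx : y = x
        · subst hyx
          simp [List.count_append, hc y]
        · simp [hyx, List.count_append, hc y, List.count_singleton, Ne.symm hyx]
      have h2 : (if c.getD x 0 = 0 then d + 1 else d) = (((p ++ [x]).toFinset.card : Nat) : Int) := by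
        rw [hc x, hd]
        have hfin : (p ++ [x]).toFinset = insert x p.toFinset := by
          simp [List.toFinset_append]
        rw [hfin]
        by_cases hx : x ∈ p
        · have : ¬ ((p.count x : Int) = 0) := by
            have := List.count_pos_iff.mpr hx
            omega
          rw [if_neg this, Finset.insert_eq_self.mpr (by simpa using hx)]
        · have : (p.count x : Int) = 0 := by
            simp [List.count_eq_zero.mpr hx]
          rw [if_pos this, Finset.card_insert_of_notMem (by simpa using hx)]
          push_cast; ring
      have := ih (p ++ [x]) _ _ h1 h2
      simpa using this

-- the prefix-sum loop produces the list of all pvT values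
lemma pref_fold (s : List Int) : ∀ (M j : Nat), s.length - j ≤ M → 1 ≤ j → j ≤ s.length →
    (PySem.List.pyRange (j : Int) ((s.length : Int)) 1).foldl (stepP s)
      ((List.range j).map (pvT s), pvT s (j - 1))
    = ((List.range s.length).map (pvT s), pvT s (s.length - 1)) := by
  intro M
  induction M with
  | zero =>
      intro j hM h1 h2
      have hj : j = s.length := by omega
      subst hj
      rw [PySem.List.pyRange_one_eq_nil (by omega)]
      rfl
  | succ M ih =>
      intro j hM h1 h2
      by_cases hj : j = s.length
      · subst hj
        rw [PySem.List.pyRange_one_eq_nil (by omega)]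
        rfl
      · have hjlt : j < s.length := by omega
        rw [PySem.List.pyRange_one_cons (by exact_mod_cast hjlt)]
        rw [List.foldl_cons]
        have hstep : stepP s ((List.range j).map (pvT s), pvT s (j - 1)) (j : Int)
            = ((List.range (j + 1)).map (pvT s), pvT s j) := by
          have hd1 : PySem.List.pyGetD s (j : Int) 0 = s.getD j 0 := PySem.List.pyGetD_natCast s j 0
          have hd2 : PySem.List.pyGetD s ((j : Int) - 1) 0 = s.getD (j - 1) 0 := by
            have : ((j : Int) - 1) = ((j - 1 : Nat) : Int) := by omega
            rw [this, PySem.List.pyGetD_natCast]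
          have hT : (if s.getD j 0 ≠ s.getD (j - 1) 0 then pvT s (j - 1) + 1 else pvT s (j - 1))
              = pvT s j := by
            have hrange : j = (j - 1) + 1 := by omega
            have hTj : pvT s j = pvT s (j - 1) + (if pvD s (j - 1) then 1 else 0) := by
              rw [pvT, pvT, hrange, List.range_succ, List.countP_append]
              simp [List.countP, List.countP.go]
              by_cases hD : pvD s (j - 1) <;> simp [hD] <;> push_cast <;> ring
            have hget1 : s.getD j 0 = s[j] := by
              rw [List.getD_eq_getElem?_getD, List.getElem?_eq_getElem hjlt]; rfl
            have hjm : j - 1 < s.length := by omega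
            have hget2 : s.getD (j - 1) 0 = s[j - 1] := by
              rw [List.getD_eq_getElem?_getD, List.getElem?_eq_getElem hjm]; rfl
            have hDval : pvD s (j - 1) = decide (¬ s[j] = s[j - 1]) := by
              rw [pvD]
              have e1 : j - 1 + 1 = j := by omega
              rw [e1, List.getElem?_eq_getElem hjlt, List.getElem?_eq_getElem hjm]
              simp
            rw [hTj, hget1, hget2, hDval]
            by_cases hne : s[j] = s[j - 1] <;> simp [hne]
          have hlist : (List.range j).map (pvT s) ++ [pvT s j]
              = (List.range (j + 1)).map (pvT s) := by
            rw [List.range_succ, List.map_append]; rfl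
          simp only [stepP, hd1, hd2]
          rw [hT, hlist]
        rw [hstep]
        have := ih (j + 1) (by omega) (by omega) (by omega)
        have hjj : ((j : Int) + 1) = ((j + 1 : Nat) : Int) := by push_cast; ring
        rw [hjj]
        have hjm1 : j + 1 - 1 = j := by omega
        rw [hjm1] at this
        exact this

-- looking up pvT in the prefix list
lemma pref_get (s : List Int) (k : Nat) (hk : k < s.length) :
    PySem.List.pyGetD ((List.range s.length).map (pvT s)) ((k : Nat) : Int) 0 = pvT s k := by
  rw [PySem.List.pyGetD_natCast]
  rw [List.getD_eq_getElem?_getD]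
  rw [List.getElem?_map]
  simp [List.getElem?_range hk]

-- the sliding main loop tracks the reference fold
lemma main_fold (s : List Int) (wn : Nat) (hw : 1 ≤ wn) (hn : wn < s.length) :
    ∀ (M k : Nat), s.length - wn - k ≤ M → 1 ≤ k → k ≤ s.length - wn →
    ∀ (c : PySem.Dict Int Int) (d : Int) (bs : Int × Int),
    (∀ x, c.getD x 0 = ((pvWin s wn (k - 1)).count x : Int)) →
    d = ((pvWin s wn (k - 1)).toFinset.card : Int) →
    ((PySem.List.pyRange (k : Int) ((s.length : Int) - (wn : Int)) 1).foldl
        (stepM s (wn : Int) ((List.range s.length).map (pvT s))) (c, d, bs.1, bs.2)).2.2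
      = (PySem.List.pyRange (k : Int) ((s.length : Int) - (wn : Int)) 1).foldl (pvStep s wn) bs := by
  intro M
  induction M with
  | zero =>
      intro k hM h1 h2 c d bs hc hd
      have hk : k = s.length - wn := by omega
      rw [PySem.List.pyRange_one_eq_nil (by omega)]
      rfl
  | succ M ih =>
      intro k hM h1 h2 c d bs hc hd
      by_cases hk : k = s.length - wn
      · rw [PySem.List.pyRange_one_eq_nil (by omega)]
        rfl
      · have hklt : k < s.length - wn := by omega
        have hkn : (k : Int) < (s.length : Int) - (wn : Int) := by omega
        rw [PySem.List.pyRange_one_cons hkn]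
        rw [List.foldl_cons, List.foldl_cons]
        -- the slide
        have hkpos : ((k : Int) > 0) := by exact_mod_cast Nat.pos_of_ne_zero (by omega)
        have hk1 : k - 1 < s.length := by omega
        have hk2 : k + wn - 1 < s.length := by omega
        have hout : PySem.List.pyGetD s ((k : Int) - 1) 0 = s[k - 1] := by
          have e : ((k : Int) - 1) = ((k - 1 : Nat) : Int) := by omega
          rw [e, PySem.List.pyGetD_natCast, List.getD_eq_getElem?_getD, List.getElem?_eq_getElem hk1]
          rfl
        have hinc : PySem.List.pyGetD s ((k : Int) + (wn : Int) - 1) 0 = s[k + wn - 1] := by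
          have e : ((k : Int) + (wn : Int) - 1) = ((k + wn - 1 : Nat) : Int) := by omega
          rw [e, PySem.List.pyGetD_natCast, List.getD_eq_getElem?_getD, List.getElem?_eq_getElem hk2]
          rfl
        set mid : List Int := (s.drop k).take (wn - 1) with hmid
        have hprev : pvWin s wn (k - 1) = s[k - 1] :: mid := by
          rw [pvWin]
          have hdrop : s.drop (k - 1) = s[k - 1] :: s.drop k := by
            have := List.drop_eq_getElem_cons hk1
            have e : k - 1 + 1 = k := by omega
            rw [e] at this
            exact this
          rw [hdrop]
          have e : wn = (wn - 1) + 1 := by omega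
          rw [e, List.take_succ_cons]
        have hmidlen : wn - 1 ≤ (s.drop k).length := by
          simp; omega
        have hnext : pvWin s wn k = mid ++ [s[k + wn - 1]] := by
          rw [pvWin]
          conv_lhs => rw [show wn = (wn - 1) + 1 from by omega, List.take_succ]
          congr 1
          have : (s.drop k)[wn - 1]? = s[k + (wn - 1)]? := List.getElem?_drop
          rw [this]
          have e2 : k + (wn - 1) = k + wn - 1 := by omega
          rw [e2, List.getElem?_eq_getElem hk2]
          rfl
        -- counts after removing s[k-1]
        have hc1 : ∀ y, (c.insert s[k - 1] (c.getD s[k - 1] 0 - 1)).getD y 0 = ((mid.count y : Nat) : Int) := by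
          intro y
          rw [PySem.Dict.getD_insert]
          by_cases hy : y = s[k - 1]
          · subst hy
            rw [hc, hprev]
            simp [List.count_cons_self]
          · have hne : s[k - 1] ≠ y := fun h => hy h.symm
            rw [if_neg hy, hc, hprev, List.count_cons]
            simp [hne]
        have hcount_out : c.getD s[k - 1] 0 - 1 = ((mid.count s[k - 1] : Nat) : Int) := by
          rw [hc, hprev]; simp [List.count_cons_self]
        -- distinct after removing s[k-1]
        have hd1 : (if c.getD s[k - 1] 0 - 1 = 0 then d - 1 else d) = ((mid.toFinset.card : Nat) : Int) := by
          rw [hcount_out, hd, hprev]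
          have hfin : (s[k - 1] :: mid).toFinset = insert s[k - 1] mid.toFinset := List.toFinset_cons
          rw [hfin]
          by_cases hx : s[k - 1] ∈ mid
          · have hne : ¬ ((mid.count s[k - 1] : Int) = 0) := by
              have := List.count_pos_iff.mpr hx
              omega
            rw [if_neg hne, Finset.insert_eq_self.mpr (by simpa using hx)]
          · have heq : ((mid.count s[k - 1] : Nat) : Int) = 0 := by
              simp [List.count_eq_zero.mpr hx]
            rw [if_pos heq, Finset.card_insert_of_notMem (by simpa using hx)]
            push_cast; ring
        -- after adding s[k+wn-1]
        have hc2 : ∀ y, ((c.insert s[k - 1] (c.getD s[k - 1] 0 - 1)).insert s[k + wn - 1]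
              ((c.insert s[k - 1] (c.getD s[k - 1] 0 - 1)).getD s[k + wn - 1] 0 + 1)).getD y 0
            = (((pvWin s wn k).count y : Nat) : Int) := by
          intro y
          rw [PySem.Dict.getD_insert]
          by_cases hy : y = s[k + wn - 1]
          · subst hy
            rw [hc1, hnext]
            simp [List.count_append]
          · have hne : s[k + wn - 1] ≠ y := fun h => hy h.symm
            rw [if_neg hy, hc1, hnext, List.count_append]
            simp [List.count_singleton, hne]
        have hd2 : (if (c.insert s[k - 1] (c.getD s[k - 1] 0 - 1)).getD s[k + wn - 1] 0 = 0
              then (if c.getD s[k - 1] 0 - 1 = 0 then d - 1 else d) + 1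
              else (if c.getD s[k - 1] 0 - 1 = 0 then d - 1 else d))
            = (((pvWin s wn k).toFinset.card : Nat) : Int) := by
          rw [hd1, hc1, hnext]
          have hfin : (mid ++ [s[k + wn - 1]]).toFinset = insert s[k + wn - 1] mid.toFinset := by
            simp [List.toFinset_append]
          rw [hfin]
          by_cases hx : s[k + wn - 1] ∈ mid
          · have hne : ¬ ((mid.count s[k + wn - 1] : Int) = 0) := by
              have := List.count_pos_iff.mpr hx
              omega
            rw [if_neg hne, Finset.insert_eq_self.mpr (by simpa using hx)]
          · have heq : ((mid.count s[k + wn - 1] : Nat) : Int) = 0 := by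
              simp [List.count_eq_zero.mpr hx]
            rw [if_pos heq, Finset.card_insert_of_notMem (by simpa using hx)]
            push_cast; ring
        -- score
        have hsc : ((pvWin s wn k).toFinset.card : Int) * 10
              + (PySem.List.pyGetD ((List.range s.length).map (pvT s)) ((k : Int) + (wn : Int) - 1) 0
               - PySem.List.pyGetD ((List.range s.length).map (pvT s)) ((k : Int)) 0)
            = pvScore s wn k := by
          have e : ((k : Int) + (wn : Int) - 1) = ((k + wn - 1 : Nat) : Int) := by omega
          rw [e, pref_get s (k + wn - 1) hk2, pref_get s k (by omega), pvScore]
        -- unfold one step of stepM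
        have hstep : stepM s (wn : Int) ((List.range s.length).map (pvT s)) (c, d, bs.1, bs.2) (k : Int)
            = (((c.insert s[k - 1] (c.getD s[k - 1] 0 - 1)).insert s[k + wn - 1]
                ((c.insert s[k - 1] (c.getD s[k - 1] 0 - 1)).getD s[k + wn - 1] 0 + 1)),
               (((pvWin s wn k).toFinset.card : Nat) : Int),
               (pvStep s wn bs (k : Int)).1, (pvStep s wn bs (k : Int)).2) := by
          simp only [stepM, if_pos hkpos, hout, hinc, hd2, hsc]
          have htn : ((k : Int)).toNat = k := by omega
          rw [pvStep]
          simp only [htn]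
          by_cases hgt : pvScore s wn k > bs.2
          · rw [if_pos hgt, if_pos hgt]
          · rw [if_neg hgt, if_neg hgt]
        rw [hstep]
        have hrec := ih (k + 1) (by omega) (by omega) (by omega)
          ((c.insert s[k - 1] (c.getD s[k - 1] 0 - 1)).insert s[k + wn - 1]
            ((c.insert s[k - 1] (c.getD s[k - 1] 0 - 1)).getD s[k + wn - 1] 0 + 1))
          (((pvWin s wn k).toFinset.card : Nat) : Int)
          (pvStep s wn bs (k : Int))
          (by intro x; simpa using hc2 x) (by simp)
        have hjj : ((k : Int) + 1) = ((k + 1 : Nat) : Int) := by push_cast; ring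
        rw [hjj]
        exact hrec



-- ===== VERDICT (by name: the statement is the Claim_ definition above) =====
theorem find_varied_window_spec : Claim_equal_find_varied_window := by
  intro s w hdom hpre
  unfold Spec_find_varied_window
  have hw0 : (0 : Int) ≤ w := hpre
  rw [A_as_fold, B_as_fold]
  by_cases hz : w ≤ 0
  · -- window_size = 0: every window is empty, A's best stays (0, 0)
    have hw : w = 0 := le_antisymm hz hw0
    subst hw
    rw [if_pos (Or.inl (le_refl (0 : Int))), A_zero_fold]
  · push_neg at hz
    by_cases hm : (s.length : Int) - w ≤ 0
    · -- no window start at all: A's range is empty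
      rw [if_pos (Or.inr hm), PySem.List.pyRange_one_eq_nil hm]
      rfl
    · push_neg at hm
      have hifc : ¬ (w ≤ 0 ∨ (s.length : Int) - w ≤ 0) := by push_neg; exact ⟨hz, by omega⟩
      rw [if_neg hifc]
      have hwn1 : 1 ≤ w.toNat := by omega
      have hwnn : w.toNat < s.length := by omega
      have hneq : ((w.toNat : Nat) : Int) = w := by omega
      -- the prefix-sum loop
      have hinit : ((List.range 1).map (pvT s), pvT s (1 - 1)) = (([0], 0) : List Int × Int) := by
        simp [pvT]
      have hpref := pref_fold s (s.length - 1) 1 (by omega) (le_refl 1) (by omega)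
      rw [hinit] at hpref
      have hone : ((1 : Nat) : Int) = (1 : Int) := by norm_num
      rw [hone] at hpref
      -- the counter-building loop
      have hslice : PySem.List.slice s none (some w) = s.take w.toNat := PySem.List.slice_to s hw0
      have hwin0 : s.take w.toNat = pvWin s w.toNat 0 := by
        rw [pvWin, List.drop_zero]
      have hcnt := cnt_fold (s.take w.toNat) [] PySem.Dict.empty 0
        (by intro x; simp) (by simp)
      simp only [List.nil_append] at hcnt
      -- split off the first iteration of the main loop
      have hcons : PySem.List.pyRange 0 ((s.length : Int) - w) 1
          = 0 :: PySem.List.pyRange 1 ((s.length : Int) - w) 1 := by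
        have := PySem.List.pyRange_one_cons (show (0 : Int) < (s.length : Int) - w by omega)
        simpa using this
      rw [A_fold_eq s w hz, hpref, hslice, hcons]
      simp only [List.foldl_cons]
      set cdp := (s.take w.toNat).foldl stepC (PySem.Dict.empty, 0) with hcdp
      set prefl := (List.range s.length).map (pvT s) with hprefl
      -- score of the first window
      have hsc0 : cdp.2 * 10 + (PySem.List.pyGetD prefl (w - 1) 0
            - PySem.List.pyGetD prefl 0 0) = pvScore s w.toNat 0 := by
        have e1 : (w - 1 : Int) = ((w.toNat - 1 : Nat) : Int) := by omega
        rw [e1, hprefl, pref_get s (w.toNat - 1) (by omega)]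
        have h0 := pref_get s 0 (by omega : 0 < s.length)
        rw [Nat.cast_zero] at h0
        rw [h0, hcdp, hcnt.2, hwin0, pvScore]
        have e2 : 0 + w.toNat - 1 = w.toNat - 1 := by omega
        rw [e2]
      -- the first iteration does not slide
      have hstep0 : stepM s w prefl (cdp.1, cdp.2, 0, 0) 0
          = (cdp.1, cdp.2, (pvStep s w.toNat ((0 : Int), (0 : Int)) 0).1,
             (pvStep s w.toNat ((0 : Int), (0 : Int)) 0).2) := by
        simp only [stepM]
        norm_num
        rw [hsc0]
        by_cases hgt : 0 < pvScore s w.toNat 0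
        · simp [pvStep, hgt]
        · simp [pvStep, hgt]
      rw [hstep0]
      -- the rest of the main loop tracks the reference fold
      have hmain := main_fold s w.toNat hwn1 hwnn (s.length - w.toNat - 1) 1
        (by omega) (le_refl 1) (by omega) cdp.1 cdp.2
        (pvStep s w.toNat ((0 : Int), (0 : Int)) 0)
        (by intro x; rw [hcdp, hcnt.1 x, hwin0]) (by rw [hcdp, hcnt.2, hwin0])
      rw [hone, hneq, ← hprefl] at hmain
      rw [hmain]
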